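-- pv_equiv track=rewrite | github.com/Postigic/Postigic.github.io | tools/get_projects.py | upper_all_keywords
-- ===== SOURCE A (Python) =====
-- def upper_all_keywords(title: str) -> str:
--     replacements = {
--         "Ascii": "ASCII",
--         "Youtube": "YouTube",
--     } # will add more on demand
--
--     for wrong, right in replacements.items():
--         title = title.replace(wrong, right)
--     return title
-- ===== SOURCE B (Python) =====
-- def upper_all_keywords(title: str) -> str:
--     replacements = {
--         "Ascii": "ASCII",
--         "Youtube": "YouTube",
--     }
--     out = []
--     i = 0
--     n = len(title)
--     while i < n:
--         for wrong, right in replacements.items():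
--             if title.startswith(wrong, i):
--                 out.append(right)
--                 i += len(wrong)
--                 break
--         else:
--             out.append(title[i])
--             i += 1
--     return "".join(out)
-- ===== Notes on version B (the rewrite author's own statement) =====
-- stated objective: alternative
-- what changed: B scans the title once left-to-right, matching the replacement table's keys at each position and emitting the replacement (or the character) as it goes, instead of A's one full replace() pass per keyword; equivalent because the two keywords and their replacements share no characters, so the passes are independent.
import Mathlib
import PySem

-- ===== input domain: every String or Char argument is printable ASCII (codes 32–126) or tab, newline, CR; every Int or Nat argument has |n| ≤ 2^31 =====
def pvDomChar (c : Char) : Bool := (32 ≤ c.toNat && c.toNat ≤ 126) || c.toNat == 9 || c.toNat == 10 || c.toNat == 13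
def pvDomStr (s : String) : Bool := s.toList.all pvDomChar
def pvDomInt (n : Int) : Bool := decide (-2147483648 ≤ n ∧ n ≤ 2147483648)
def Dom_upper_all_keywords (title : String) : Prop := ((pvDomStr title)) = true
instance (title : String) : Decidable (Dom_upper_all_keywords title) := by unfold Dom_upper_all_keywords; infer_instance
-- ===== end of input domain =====

-- B replaces A's sequential per-keyword replace() passes by a single left-to-right scan
-- that matches the keyword table at each position (alternative decomposition, same cost).


-- ===== PORT A =====
-- A: loop over the replacements dict, doing title = title.replace(wrong, right) each time.
def upper_all_keywords (title : String) : String :=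
  (([("Ascii", "ASCII"), ("Youtube", "YouTube")] : List (String × String))).foldl
    (fun t wr => PySem.Str.replace t wr.1 wr.2) title

-- ===== PORT B =====
-- the keyword table as character lists ("Ascii" = 'A'::prA etc.)
def prA : List Char := ['s', 'c', 'i', 'i']
def prY : List Char := ['o', 'u', 't', 'u', 'b', 'e']
def kwAscii : List Char := 'A' :: prA
def kwASCII : List Char := ['A', 'S', 'C', 'I', 'I']
def kwYoutube : List Char := 'Y' :: prY
def kwYouTube : List Char := ['Y', 'o', 'u', 'T', 'u', 'b', 'e']

-- B's single left-to-right scan: try each table key at the current position (table order),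
-- emit its replacement and skip its length, else emit the character and advance by one.
def uakScan : List Char → List Char
  | [] => []
  | c :: t =>
    if kwAscii.isPrefixOf (c :: t) then kwASCII ++ uakScan (t.drop 4)
    else if kwYoutube.isPrefixOf (c :: t) then kwYouTube ++ uakScan (t.drop 6)
    else c :: uakScan t
termination_by l => l.length
decreasing_by
  · simp only [List.length_cons, List.length_drop]; omega
  · simp only [List.length_cons, List.length_drop]; omega
  · simp

def upper_all_keywords_alt (title : String) : String :=
  String.ofList (uakScan title.toList)

-- ===== PRECONDITION & SPEC =====
def Spec_upper_all_keywords (title : String) (out : String) : Prop := out = upper_all_keywords_alt title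
instance (title : String) (out : String) : Decidable (Spec_upper_all_keywords title out) := by unfold Spec_upper_all_keywords; infer_instance

-- ===== CLAIM (what is proved, stated in full; the proofs are below) =====
def Claim_equal_upper_all_keywords : Prop := ∀ (title : String), Dom_upper_all_keywords title → Spec_upper_all_keywords title (upper_all_keywords title)

-- ===== LEMMAS AND PROOFS =====

-- proof-side characterisation of a single left-to-right replace pass with a nonempty pattern
def uakRep (p0 : Char) (pr new : List Char) : List Char → List Char
  | [] => []
  | c :: t =>
    if (p0 :: pr).isPrefixOf (c :: t) then new ++ uakRep p0 pr new (t.drop pr.length)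
    else c :: uakRep p0 pr new t
termination_by l => l.length
decreasing_by
  · simp only [List.length_cons, List.length_drop]; omega
  · simp

lemma uak_go (p0 : Char) (pr new : List Char) :
    ∀ (fuel : Nat) (l acc : List Char), l.length ≤ fuel →
      PySem.Chars.replace.go (p0 :: pr) new fuel l acc = acc.reverse ++ uakRep p0 pr new l := by
  intro fuel
  induction fuel with
  | zero =>
    intro l acc h
    have : l = [] := List.eq_nil_of_length_eq_zero (Nat.le_zero.mp h)
    subst this
    simp [PySem.Chars.replace.go, uakRep]
  | succ n ih =>
    intro l acc h
    cases l with
    | nil => simp [PySem.Chars.replace.go, uakRep]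
    | cons c t =>
      rw [PySem.Chars.replace.go]
      by_cases hp : (p0 :: pr).isPrefixOf (c :: t)
      · simp only [hp, if_true]
        rw [uakRep, if_pos hp]
        have hlen : (List.drop (p0 :: pr).length (c :: t)).length ≤ n := by
          simp only [List.length_drop, List.length_cons] at *
          omega
        rw [ih _ _ hlen]
        simp [List.drop_succ_cons]
      · simp only [hp]
        rw [uakRep, if_neg hp]
        have hlen : t.length ≤ n := by simp only [List.length_cons] at h; omega
        rw [ih _ _ hlen]
        simp

lemma uak_replace_eq (p0 : Char) (pr new : List Char) (s : List Char) :
    PySem.Chars.replace s (p0 :: pr) new = uakRep p0 pr new s := by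
  rw [PySem.Chars.replace]
  simp only [List.isEmpty_cons, if_false, Bool.false_eq_true]
  simpa using uak_go p0 pr new s.length s [] (le_refl _)

-- a replace pass slides over a block that does not contain the pattern's first character
lemma uakRep_append (p0 : Char) (pr new : List Char) (a x : List Char) (h : p0 ∉ a) :
    uakRep p0 pr new (a ++ x) = a ++ uakRep p0 pr new x := by
  induction a with
  | nil => simp
  | cons b a ih =>
    have hb : p0 ≠ b := fun he => h (he ▸ List.mem_cons_self ..)
    have hng : ¬ (p0 :: pr).isPrefixOf (b :: (a ++ x)) = true := by
      rw [List.isPrefixOf_cons₂, beq_eq_false_iff_ne.mpr hb]; simp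
    rw [List.cons_append, uakRep, if_neg hng, ih (fun hm => h (List.mem_cons_of_mem _ hm))]
    rw [List.cons_append]

-- a pattern q whose characters occur neither in the replaced pattern nor in its replacement
-- is a prefix of the output of a replace pass iff it is a prefix of the input
lemma uakRep_prefix (p0 : Char) (pr : List Char) (n0 : Char) (ns : List Char) :
    ∀ (t q : List Char), (∀ a ∈ q, a ∉ (p0 :: pr) ∧ a ∉ (n0 :: ns)) →
      q.isPrefixOf (uakRep p0 pr (n0 :: ns) t) = q.isPrefixOf t := by
  intro t
  induction t with
  | nil => intro q _; rw [uakRep]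
  | cons d t ih =>
    intro q hq
    by_cases hp : (p0 :: pr).isPrefixOf (d :: t)
    · rw [uakRep, if_pos hp]
      cases q with
      | nil => simp [List.isPrefixOf]
      | cons q0 q' =>
        have hd : p0 = d := by
          simp only [List.isPrefixOf] at hp
          exact (eq_of_beq (Bool.and_elim_left hp))
        have h1 : q0 ≠ n0 := fun he => ((hq q0 (List.mem_cons_self ..)).2) (he ▸ List.mem_cons_self ..)
        have h2 : q0 ≠ d := fun he => ((hq q0 (List.mem_cons_self ..)).1) (by rw [he, ← hd]; exact List.mem_cons_self ..)
        rw [List.cons_append, List.isPrefixOf_cons₂, List.isPrefixOf_cons₂,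
           beq_eq_false_iff_ne.mpr h1, beq_eq_false_iff_ne.mpr h2]
        simp
    · rw [uakRep, if_neg hp]
      cases q with
      | nil => simp [List.isPrefixOf]
      | cons q0 q' =>
        have := ih q' (fun a ha => hq a (List.mem_cons_of_mem _ ha))
        simp [List.isPrefixOf, this]

-- the scan computes exactly the two sequential replace passes (the keyword alphabets are disjoint)
lemma uak_main : ∀ (n : Nat) (cs : List Char), cs.length ≤ n →
    uakScan cs = uakRep 'Y' prY kwYouTube (uakRep 'A' prA kwASCII cs) := by
  intro n
  induction n with
  | zero =>
    intro cs h
    have : cs = [] := List.eq_nil_of_length_eq_zero (Nat.le_zero.mp h)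
    subst this
    rw [uakScan, uakRep, uakRep]
  | succ n ih =>
    intro cs h
    cases cs with
    | nil => rw [uakScan, uakRep, uakRep]
    | cons c t =>
      by_cases hA : kwAscii.isPrefixOf (c :: t)
      · obtain ⟨r, hr⟩ := List.isPrefixOf_iff_prefix.mp hA
        rw [kwAscii, List.cons_append] at hr
        injection hr with hc ht
        subst hc
        subst ht
        have hdrop : (prA ++ r).drop 4 = r := by simp [prA]
        have hlen : r.length ≤ n := by
          simp only [List.length_cons, List.length_append, prA] at h ⊢; omega
        rw [uakScan, if_pos hA, hdrop]
        rw [uakRep, if_pos (show ('A' :: prA).isPrefixOf ('A' :: (prA ++ r)) = true from hA)]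
        rw [show prA.length = 4 from rfl, hdrop]
        rw [uakRep_append 'Y' prY kwYouTube kwASCII _ (by simp [kwASCII])]
        rw [ih r hlen]
      · by_cases hY : kwYoutube.isPrefixOf (c :: t)
        · obtain ⟨r, hr⟩ := List.isPrefixOf_iff_prefix.mp hY
          rw [kwYoutube, List.cons_append] at hr
          injection hr with hc ht
          subst hc
          subst ht
          have hdrop : (prY ++ r).drop 6 = r := by simp [prY]
          have hlen : r.length ≤ n := by
            simp only [List.length_cons, List.length_append, prY] at h ⊢; omega
          rw [uakScan, if_neg hA, if_pos hY, hdrop]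
          rw [show ('Y' :: (prY ++ r)) = (('Y' :: prY) ++ r) from rfl]
          rw [uakRep_append 'A' prA kwASCII ('Y' :: prY) r (by simp [prY])]
          rw [List.cons_append, uakRep]
          rw [if_pos (show ('Y' :: prY).isPrefixOf ('Y' :: (prY ++ uakRep 'A' prA kwASCII r)) = true from by
            apply List.isPrefixOf_iff_prefix.mpr
            exact ⟨uakRep 'A' prA kwASCII r, by simp⟩)]
          rw [show prY.length = 6 from rfl]
          rw [show (prY ++ uakRep 'A' prA kwASCII r).drop 6 = uakRep 'A' prA kwASCII r from by simp [prY]]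
          rw [ih r hlen]
        · have hlen : t.length ≤ n := by simp only [List.length_cons] at h; omega
          rw [uakScan, if_neg hA, if_neg hY]
          rw [show uakRep 'A' prA kwASCII (c :: t)
                = c :: uakRep 'A' prA kwASCII t from by
            rw [uakRep, if_neg (show ¬ ('A' :: prA).isPrefixOf (c :: t) from hA)]
          ]
          have hpre : prY.isPrefixOf (uakRep 'A' prA kwASCII t) = prY.isPrefixOf t :=
            uakRep_prefix 'A' prA 'A' ['S', 'C', 'I', 'I'] t prY (by simp [prY, prA])
          rw [show uakRep 'Y' prY kwYouTube (c :: uakRep 'A' prA kwASCII t)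
                = c :: uakRep 'Y' prY kwYouTube (uakRep 'A' prA kwASCII t) from by
            rw [uakRep]
            rw [if_neg (show ¬ ('Y' :: prY).isPrefixOf (c :: uakRep 'A' prA kwASCII t) from by
              intro hcon
              apply hY
              simp only [List.isPrefixOf] at hcon ⊢
              rw [hpre] at hcon
              exact hcon)]
          ]
          rw [ih t hlen]

-- ===== VERDICT (by name: the statement is the Claim_ definition above) =====
theorem upper_all_keywords_spec : Claim_equal_upper_all_keywords := by
  intro title _
  unfold Spec_upper_all_keywords upper_all_keywords upper_all_keywords_alt
  simp only [List.foldl_cons, List.foldl_nil]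
  rw [PySem.Str.replace, PySem.Str.replace]
  congr 1
  rw [String.toList_ofList]
  rw [show ("Ascii" : String).toList = 'A' :: prA from by decide,
      show ("ASCII" : String).toList = kwASCII from by decide,
      show ("Youtube" : String).toList = 'Y' :: prY from by decide,
      show ("YouTube" : String).toList = kwYouTube from by decide]
  rw [uak_replace_eq, uak_replace_eq]
  exact (uak_main title.toList.length title.toList (le_refl _)).symm
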